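-- pv_equiv track=rewrite | github.com/hieuhanhan/tech-stock-forecasting- | baseline_rwd.py | pick_train_val_paths
-- ===== SOURCE A (Python) =====
-- def pick_train_val_paths(rec: dict, mode: str) -> tuple[str|None, str|None]:
--     train_keys = [k for k in rec if "train_path" in k]
--     val_keys   = [k for k in rec if "val_path"   in k and "meta" not in k]
--     def pref(keys):
--         m = [k for k in keys if mode.lower() in k.lower()]
--         return (m[0] if m else (keys[0] if keys else None))
--     tk, vk = pref(train_keys), pref(val_keys)
--     return (rec.get(tk) if tk else None, rec.get(vk) if vk else None)
-- ===== SOURCE B (Python) =====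
-- def pick_train_val_paths(rec: dict, mode: str) -> tuple[str | None, str | None]:
--     ml = mode.lower()
--     tp = ta = vp = va = None
--     for k in rec:
--         if "train_path" in k:
--             if ta is None:
--                 ta = k
--             if tp is None and ml in k.lower():
--                 tp = k
--         if "val_path" in k and "meta" not in k:
--             if va is None:
--                 va = k
--             if vp is None and ml in k.lower():
--                 vp = k
--     tk = tp if tp is not None else ta
--     vk = vp if vp is not None else va
--     return (rec[tk] if tk is not None else None, rec[vk] if vk is not None else None)
-- ===== Notes on version B (the rewrite author's own statement) =====
-- stated objective: alternative
-- what changed: Replaces A's build-two-filtered-key-lists-then-scan-again-for-preferred approach with a single pass over the keys that tracks the first preferred and first fallback match for train and val in four accumulators.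
import Mathlib
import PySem

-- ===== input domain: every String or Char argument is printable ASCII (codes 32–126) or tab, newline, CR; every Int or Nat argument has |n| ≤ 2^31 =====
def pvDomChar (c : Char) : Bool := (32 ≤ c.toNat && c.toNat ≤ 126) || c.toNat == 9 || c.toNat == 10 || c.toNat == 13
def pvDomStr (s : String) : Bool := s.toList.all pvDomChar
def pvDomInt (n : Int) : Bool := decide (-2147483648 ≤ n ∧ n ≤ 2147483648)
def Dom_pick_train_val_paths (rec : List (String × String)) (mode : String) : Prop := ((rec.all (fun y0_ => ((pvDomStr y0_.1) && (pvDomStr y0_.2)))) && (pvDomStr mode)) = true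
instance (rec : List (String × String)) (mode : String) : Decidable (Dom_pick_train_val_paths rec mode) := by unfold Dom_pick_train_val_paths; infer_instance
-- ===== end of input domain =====

-- B replaces A's three key scans (two filtered lists plus a preferred rescan) by one
-- pass over the keys tracking four first-match accumulators; objective: alternative.

-- ===== PORT A =====
-- 'm[0] if m else (keys[0] if keys else None)'
def pickA_pref (mode : String) (keys : List String) : Option String :=
  let m := keys.filter (fun k => PySem.Str.isIn (PySem.Str.lower mode) (PySem.Str.lower k))
  match m with
  | x :: _ => some x
  | [] => keys.head?

def pick_train_val_paths (rec : List (String × String)) (mode : String) : Option String × Option String :=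
  let d := PySem.Dict.ofList rec
  let train_keys := d.keys.filter (fun k => PySem.Str.isIn "train_path" k)
  let val_keys := d.keys.filter (fun k => PySem.Str.isIn "val_path" k && !(PySem.Str.isIn "meta" k))
  let tk := pickA_pref mode train_keys
  let vk := pickA_pref mode val_keys
  -- 'rec.get(tk) if tk else None': None and "" are falsy
  ((match tk with | none => none | some k => if k = "" then none else d.get? k),
   (match vk with | none => none | some k => if k = "" then none else d.get? k))

-- ===== PORT B =====
-- one step of B's loop body over the four accumulators (tp, ta, vp, va)
def pickB_step (ml : String) (s : Option String × Option String × Option String × Option String)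
    (k : String) : Option String × Option String × Option String × Option String :=
  let (tp, ta, vp, va) := s
  let (tp, ta) :=
    if PySem.Str.isIn "train_path" k then
      ((if tp.isNone && PySem.Str.isIn ml (PySem.Str.lower k) then some k else tp),
       (if ta.isNone then some k else ta))
    else (tp, ta)
  let (vp, va) :=
    if PySem.Str.isIn "val_path" k && !(PySem.Str.isIn "meta" k) then
      ((if vp.isNone && PySem.Str.isIn ml (PySem.Str.lower k) then some k else vp),
       (if va.isNone then some k else va))
    else (vp, va)
  (tp, ta, vp, va)

def pick_train_val_paths_alt (rec : List (String × String)) (mode : String) : Option String × Option String :=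
  let d := PySem.Dict.ofList rec
  let ml := PySem.Str.lower mode
  let (tp, ta, vp, va) := d.keys.foldl (pickB_step ml) (none, none, none, none)
  let tk := tp.or ta
  let vk := vp.or va
  ((match tk with | none => none | some k => d.get? k),
   (match vk with | none => none | some k => d.get? k))

-- ===== PRECONDITION & SPEC =====
def Spec_pick_train_val_paths (rec : List (String × String)) (mode : String) (out : Option String × Option String) : Prop := out = pick_train_val_paths_alt rec mode
instance (rec : List (String × String)) (mode : String) (out : Option String × Option String) : Decidable (Spec_pick_train_val_paths rec mode out) := by unfold Spec_pick_train_val_paths; infer_instance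

-- ===== CLAIM (what is proved, stated in full; the proofs are below) =====
def Claim_equal_pick_train_val_paths : Prop := ∀ (rec : List (String × String)) (mode : String), Dom_pick_train_val_paths rec mode → Spec_pick_train_val_paths rec mode (pick_train_val_paths rec mode)

-- ===== LEMMAS AND PROOFS =====

-- one step of B's loop is a componentwise or-else with a per-key option
lemma pickB_step_eq (ml k : String) (tp ta vp va : Option String) :
    pickB_step ml (tp, ta, vp, va) k =
      (tp.or (if PySem.Str.isIn ml (PySem.Str.lower k) && PySem.Str.isIn "train_path" k then some k else none),
       ta.or (if PySem.Str.isIn "train_path" k then some k else none),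
       vp.or (if PySem.Str.isIn ml (PySem.Str.lower k) && (PySem.Str.isIn "val_path" k && !(PySem.Str.isIn "meta" k)) then some k else none),
       va.or (if PySem.Str.isIn "val_path" k && !(PySem.Str.isIn "meta" k) then some k else none)) := by
  cases tp <;> cases ta <;> cases vp <;> cases va <;>
    simp only [pickB_step, Option.isNone_none, Option.isNone_some, Bool.true_and, Bool.false_and] <;>
    split_ifs <;> simp_all

-- first-match invariant of B's fold: each accumulator ends as its start value
-- or-else the head of the corresponding filtered key list
lemma pickB_fold_inv (ml : String) (ks : List String)
    (tp ta vp va : Option String) :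
    ks.foldl (pickB_step ml) (tp, ta, vp, va) =
      (tp.or ((ks.filter (fun k => PySem.Str.isIn ml (PySem.Str.lower k) && PySem.Str.isIn "train_path" k)).head?),
       ta.or ((ks.filter (fun k => PySem.Str.isIn "train_path" k)).head?),
       vp.or ((ks.filter (fun k => PySem.Str.isIn ml (PySem.Str.lower k) && (PySem.Str.isIn "val_path" k && !(PySem.Str.isIn "meta" k)))).head?),
       va.or ((ks.filter (fun k => PySem.Str.isIn "val_path" k && !(PySem.Str.isIn "meta" k))).head?)) := by
  induction ks generalizing tp ta vp va with
  | nil => simp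
  | cons k ks ih =>
    rw [List.foldl_cons, pickB_step_eq, ih]
    simp only [List.filter_cons]
    split_ifs <;> simp_all

-- A's pref on a filtered key list is preferred-head or-else head, filters fused
lemma pickA_pref_eq (mode : String) (p : String → Bool) (ks : List String) :
    pickA_pref mode (ks.filter p) =
      ((ks.filter (fun k => PySem.Str.isIn (PySem.Str.lower mode) (PySem.Str.lower k) && p k)).head?).or
        ((ks.filter p).head?) := by
  unfold pickA_pref
  rw [List.filter_filter]
  cases h : ks.filter (fun k => PySem.Str.isIn (PySem.Str.lower mode) (PySem.Str.lower k) && p k) with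
  | nil => simp
  | cons x xs => simp

-- a key selected from a filtered list satisfies the filter's predicate
lemma head?_filter_pred {p : String → Bool} {ks : List String} {k : String}
    (h : (ks.filter p).head? = some k) : p k = true := by
  have hm : k ∈ ks.filter p := by
    cases hf : ks.filter p with
    | nil => simp [hf] at h
    | cons x xs => simp [hf] at h; simp [h]
  exact (List.mem_filter.mp hm).2

lemma isIn_train_ne_empty {k : String} (h : PySem.Str.isIn "train_path" k = true) : k ≠ "" := by
  rintro rfl; exact absurd h (by decide)

lemma isIn_val_ne_empty {k : String} (h : (PySem.Str.isIn "val_path" k && !(PySem.Str.isIn "meta" k)) = true) : k ≠ "" := by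
  rintro rfl; exact absurd h (by decide)

-- ===== VERDICT (by name: the statement is the Claim_ definition above) =====
theorem pick_train_val_paths_spec : Claim_equal_pick_train_val_paths := by
  intro rec mode _
  unfold Spec_pick_train_val_paths
  simp only [pick_train_val_paths, pick_train_val_paths_alt, pickB_fold_inv, pickA_pref_eq,
    Option.none_or]
  refine Prod.ext ?_ ?_
  · cases htk : (List.filter (fun k => PySem.Str.isIn (PySem.Str.lower mode) (PySem.Str.lower k) && PySem.Str.isIn "train_path" k) (PySem.Dict.ofList rec).keys).head?.or
        (List.filter (fun k => PySem.Str.isIn "train_path" k) (PySem.Dict.ofList rec).keys).head? with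
    | none => rfl
    | some k =>
      have hk : k ≠ "" := by
        rcases Option.or_eq_some_iff.mp htk with h | ⟨_, h⟩
        · exact isIn_train_ne_empty ((Bool.and_eq_true _ _ |>.mp (head?_filter_pred h)).2)
        · exact isIn_train_ne_empty (head?_filter_pred h)
      simp [hk]
  · cases hvk : (List.filter (fun k => PySem.Str.isIn (PySem.Str.lower mode) (PySem.Str.lower k) && (PySem.Str.isIn "val_path" k && !PySem.Str.isIn "meta" k)) (PySem.Dict.ofList rec).keys).head?.or
        (List.filter (fun k => PySem.Str.isIn "val_path" k && !PySem.Str.isIn "meta" k) (PySem.Dict.ofList rec).keys).head? with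
    | none => rfl
    | some k =>
      have hk : k ≠ "" := by
        rcases Option.or_eq_some_iff.mp hvk with h | ⟨_, h⟩
        · exact isIn_val_ne_empty ((Bool.and_eq_true _ _ |>.mp (head?_filter_pred h)).2)
        · exact isIn_val_ne_empty (head?_filter_pred h)
      simp [hk]
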